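-- pv_equiv track=rewrite | github.com/melonoidz/Competitive-programming | atcoder/abc182/c.py | solve
-- ===== SOURCE A (Python) =====
-- def solve(n):
--     cnt = [0]*3
--     for a in n:
--         tmp = ord(a)-ord('0')
--         cnt[tmp % 3] += 1
--     s = cnt[1]*1+cnt[2]*2
--     s %= 3
--     if s == 0:
--         return 0
--     elif s == 1:
--         if cnt[1] >= 1:
--             return 1
--         elif cnt[2] >= 2:
--             return 2
--         else:
--             return -1
--     elif s == 2:
--         if cnt[2] >= 1:
--             return 1
--         elif cnt[1] >= 2:
--             return 2
--         else:
--             return -1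
-- ===== SOURCE B (Python) =====
-- def solve(n):
--     r = [(ord(a) - ord('0')) % 3 for a in n]
--     s = sum(r) % 3
--     if s == 0:
--         return 0
--     if any(x == s for x in r):
--         return 1
--     for i in range(len(r)):
--         for j in range(i + 1, len(r)):
--             if (r[i] + r[j]) % 3 == s:
--                 return 2
--     return -1
-- ===== Notes on version B (the rewrite author's own statement) =====
-- stated objective: alternative
-- what changed: B searches directly for a removal: digit-sum residue 0 means 0 deletions, then a single scan for one digit whose residue equals the needed residue, then a quadratic scan over pairs of digits, instead of A's residue-count table with closed-form case dispatch on cnt[1]/cnt[2].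
import Mathlib
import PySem

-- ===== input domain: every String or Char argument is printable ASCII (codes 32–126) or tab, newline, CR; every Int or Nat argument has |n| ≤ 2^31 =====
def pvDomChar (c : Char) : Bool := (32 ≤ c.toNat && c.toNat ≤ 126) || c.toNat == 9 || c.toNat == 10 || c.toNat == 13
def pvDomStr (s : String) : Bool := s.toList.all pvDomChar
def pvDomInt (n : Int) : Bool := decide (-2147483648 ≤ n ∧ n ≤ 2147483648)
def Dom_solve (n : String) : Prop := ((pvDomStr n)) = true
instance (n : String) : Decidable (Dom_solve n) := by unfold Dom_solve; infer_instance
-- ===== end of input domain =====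

-- B replaces A's residue-count table and closed-form case dispatch by a direct search for a
-- 0-, 1- or 2-digit removal (alternative decomposition; equivalence proved below).

-- ===== PORT A =====
-- the body of A's `for a in n` loop (cnt kept as a triple cnt[0], cnt[1], cnt[2])
def stepA (c : Int × Int × Int) (a : Char) : Int × Int × Int :=
  let tmp : Int := (a.toNat : Int) - 48
  let r := PySem.Int.mod tmp 3
  if r = 0 then (c.1 + 1, c.2.1, c.2.2)
  else if r = 1 then (c.1, c.2.1 + 1, c.2.2)
  else (c.1, c.2.1, c.2.2 + 1)

def solve (n : String) : Int :=
  let cnt := n.toList.foldl stepA (0, 0, 0)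
  let s := PySem.Int.mod (cnt.2.1 * 1 + cnt.2.2 * 2) 3
  if s = 0 then 0
  else if s = 1 then
    (if cnt.2.1 ≥ 1 then 1 else if cnt.2.2 ≥ 2 then 2 else -1)
  else
    -- s = 2: s is a `% 3` of a nonnegative value, so 0/1/2 are the only cases and
    -- Python's trailing implicit `None` is unreachable
    (if cnt.2.2 ≥ 1 then 1 else if cnt.2.1 ≥ 2 then 2 else -1)

-- ===== PORT B =====
-- B's nested pair loop `for i … for j in range(i+1, …)` as recursion on the list
def pairScan : List Int → Int → Bool
  | [], _ => false
  | x :: xs, s => xs.any (fun y => PySem.Int.mod (x + y) 3 == s) || pairScan xs s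

def solve_alt (n : String) : Int :=
  let r := n.toList.map (fun a => PySem.Int.mod ((a.toNat : Int) - 48) 3)
  let s := PySem.Int.mod (r.foldl (· + ·) 0) 3
  if s = 0 then 0
  else if r.any (fun x => x == s) then 1
  else if pairScan r s then 2
  else -1

-- ===== PRECONDITION & SPEC =====
def Spec_solve (n : String) (out : Int) : Prop := out = solve_alt n
instance (n : String) (out : Int) : Decidable (Spec_solve n out) := by unfold Spec_solve; infer_instance

-- ===== CLAIM (what is proved, stated in full; the proofs are below) =====
def Claim_equal_solve : Prop := ∀ (n : String), Dom_solve n → Spec_solve n (solve n)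

-- ===== LEMMAS AND PROOFS =====

-- the residue of one character, as both ports compute it
def res (a : Char) : Int := PySem.Int.mod ((a.toNat : Int) - 48) 3

theorem res_cases (a : Char) : res a = 0 ∨ res a = 1 ∨ res a = 2 := by
  have h1 := PySem.Int.mod_nonneg ((a.toNat : Int) - 48) (b := 3) (by norm_num)
  have h2 := PySem.Int.mod_lt ((a.toNat : Int) - 48) (b := 3) (by norm_num)
  unfold res; omega

theorem foldA_eq (l : List Char) (x y z : Int) :
    l.foldl stepA (x, y, z) =
      (x + (l.countP (fun a => res a == 0) : Int),
       y + (l.countP (fun a => res a == 1) : Int),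
       z + (l.countP (fun a => res a == 2) : Int)) := by
  induction l generalizing x y z with
  | nil => simp
  | cons a l ih =>
    have hstepr : PySem.Int.mod ((a.toNat : Int) - 48) 3 = res a := rfl
    simp only [List.foldl_cons, List.countP_cons, stepA, hstepr]
    rcases res_cases a with h | h | h <;>
      simp [h, ih, Prod.ext_iff] <;> omega

theorem sumB_eq (l : List Char) (t : Int) :
    (l.map res).foldl (· + ·) t =
      t + (l.countP (fun a => res a == 1) : Int) + 2 * (l.countP (fun a => res a == 2) : Int) := by
  induction l generalizing t with
  | nil => simp
  | cons a l ih =>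
    simp only [List.map_cons, List.foldl_cons, List.countP_cons]
    rcases res_cases a with h | h | h <;> simp [ih, h] <;> ring

theorem anyB_iff (l : List Char) (s : Int) :
    (l.map res).any (fun x => x == s) = true ↔ 0 < l.countP (fun a => res a == s) := by
  simp [List.any_map, List.any_eq_true, List.countP_pos_iff, Function.comp]

theorem count_map_res (l : List Char) (v : Int) :
    (l.map res).count v = l.countP (fun a => res a == v) := by
  simp [List.count, List.countP_map, Function.comp_def, BEq.comm]

theorem pairScan_one (r : List Int) (h : ∀ x ∈ r, x = 0 ∨ x = 2) :
    pairScan r 1 = true ↔ 2 ≤ r.count 2 := by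
  induction r with
  | nil => simp [pairScan]
  | cons x xs ih =>
    have hx := h x (by simp)
    have hxs : ∀ y ∈ xs, y = 0 ∨ y = 2 := fun y hy => h y (by simp [hy])
    have ih' := ih hxs
    rcases hx with hx | hx
    · subst hx
      have hany : xs.any (fun y => PySem.Int.mod (0 + y) 3 == 1) = false := by
        rw [List.any_eq_false]
        intro y hy
        rcases hxs y hy with h' | h' <;> subst h' <;> decide
      show ((xs.any fun y => PySem.Int.mod (0 + y) 3 == 1) || pairScan xs 1) = true ↔ _
      rw [hany, Bool.false_or, ih']
      simp

    · subst hx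
      have hany : (xs.any (fun y => PySem.Int.mod (2 + y) 3 == 1) = true) ↔ 0 < xs.count 2 := by
        rw [List.any_eq_true, List.count_pos_iff]
        constructor
        · rintro ⟨y, hy, hEq⟩
          rcases hxs y hy with h' | h' <;> subst h' <;> simp_all
        · rintro hy
          exact ⟨2, hy, by decide⟩
      show ((xs.any fun y => PySem.Int.mod (2 + y) 3 == 1) || pairScan xs 1) = true ↔ _
      rw [Bool.or_eq_true, hany, ih', List.count_cons_self]
      omega

theorem pairScan_two (r : List Int) (h : ∀ x ∈ r, x = 0 ∨ x = 1) :
    pairScan r 2 = true ↔ 2 ≤ r.count 1 := by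
  induction r with
  | nil => simp [pairScan]
  | cons x xs ih =>
    have hx := h x (by simp)
    have hxs : ∀ y ∈ xs, y = 0 ∨ y = 1 := fun y hy => h y (by simp [hy])
    have ih' := ih hxs
    rcases hx with hx | hx
    · subst hx
      have hany : xs.any (fun y => PySem.Int.mod (0 + y) 3 == 2) = false := by
        rw [List.any_eq_false]
        intro y hy
        rcases hxs y hy with h' | h' <;> subst h' <;> decide
      show ((xs.any fun y => PySem.Int.mod (0 + y) 3 == 2) || pairScan xs 2) = true ↔ _
      rw [hany, Bool.false_or, ih']
      simp

    · subst hx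
      have hany : (xs.any (fun y => PySem.Int.mod (1 + y) 3 == 2) = true) ↔ 0 < xs.count 1 := by
        rw [List.any_eq_true, List.count_pos_iff]
        constructor
        · rintro ⟨y, hy, hEq⟩
          rcases hxs y hy with h' | h' <;> subst h' <;> simp_all
        · rintro hy
          exact ⟨1, hy, by decide⟩
      show ((xs.any fun y => PySem.Int.mod (1 + y) 3 == 2) || pairScan xs 2) = true ↔ _
      rw [Bool.or_eq_true, hany, ih', List.count_cons_self]
      omega

-- ===== VERDICT (by name: the statement is the Claim_ definition above) =====
theorem solve_spec : Claim_equal_solve := by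
  intro n _
  unfold Spec_solve solve solve_alt
  have hres : (fun a : Char => PySem.Int.mod ((a.toNat : Int) - 48) 3) = res := rfl
  rw [hres]
  simp only [foldA_eq, sumB_eq, zero_add]
  set l := n.toList with hl
  set c1 : Nat := l.countP (fun a => res a == 1) with hc1
  set c2 : Nat := l.countP (fun a => res a == 2) with hc2
  rw [show (c1 : Int) * 1 + (c2 : Int) * 2 = (c1 : Int) + 2 * (c2 : Int) from by ring]
  set s : Int := PySem.Int.mod ((c1 : Int) + 2 * (c2 : Int)) 3 with hs
  have hs0 := PySem.Int.mod_nonneg ((c1 : Int) + 2 * (c2 : Int)) (b := 3) (by norm_num)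
  have hs3 := PySem.Int.mod_lt ((c1 : Int) + 2 * (c2 : Int)) (b := 3) (by norm_num)
  rw [← hs] at hs0 hs3
  have hany : ∀ t : Int, ((l.map res).any (fun x => x == t) = true ↔
      0 < l.countP (fun a => res a == t)) := fun t => anyB_iff l t
  rcases (show s = 0 ∨ s = 1 ∨ s = 2 by omega) with h | h | h
  · rw [h, if_pos rfl, if_pos rfl]
  · -- s = 1 : one removal works iff a residue-1 digit exists (cnt[1] ≥ 1)
    rw [h, if_neg (by norm_num : ¬ ((1:Int) = 0)), if_neg (by norm_num : ¬ ((1:Int) = 0)),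
        if_pos (rfl : (1:Int) = 1)]
    by_cases h1 : 0 < c1
    · rw [if_pos (show (c1 : Int) ≥ 1 by exact_mod_cast h1), if_pos ((hany 1).2 h1)]
    · have hno : ¬ (((l.map res).any (fun x => x == (1:Int))) = true) := by
        rw [hany 1]; omega
      have hmem : ∀ x ∈ l.map res, x = 0 ∨ x = 2 := by
        intro x hx
        rcases List.mem_map.1 hx with ⟨a, ha, rfl⟩
        rcases res_cases a with h' | h' | h'
        · exact Or.inl h'
        · exact absurd ((List.countP_pos_iff (p := fun c => res c == 1)).2 ⟨a, ha, beq_iff_eq.mpr h'⟩) (by omega)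
        · exact Or.inr h'
      have hpair := pairScan_one (l.map res) hmem
      rw [count_map_res l 2, ← hc2] at hpair
      rw [if_neg (show ¬ ((c1 : Int) ≥ 1) by exact_mod_cast h1), if_neg hno]
      by_cases h2 : 2 ≤ c2
      · rw [if_pos (show (c2 : Int) ≥ 2 by exact_mod_cast h2), if_pos (hpair.2 h2)]
      · rw [if_neg (show ¬ ((c2 : Int) ≥ 2) by exact_mod_cast h2),
            if_neg (show ¬ (pairScan (l.map res) 1 = true) from by rw [hpair]; omega)]
  · -- s = 2 : one removal works iff a residue-2 digit exists (cnt[2] ≥ 1)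
    rw [h, if_neg (by norm_num : ¬ ((2:Int) = 0)), if_neg (by norm_num : ¬ ((2:Int) = 0)),
        if_neg (by norm_num : ¬ ((2:Int) = 1))]
    by_cases h2 : 0 < c2
    · rw [if_pos (show (c2 : Int) ≥ 1 by exact_mod_cast h2), if_pos ((hany 2).2 h2)]
    · have hno : ¬ (((l.map res).any (fun x => x == (2:Int))) = true) := by
        rw [hany 2]; omega
      have hmem : ∀ x ∈ l.map res, x = 0 ∨ x = 1 := by
        intro x hx
        rcases List.mem_map.1 hx with ⟨a, ha, rfl⟩
        rcases res_cases a with h' | h' | h'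
        · exact Or.inl h'
        · exact Or.inr h'
        · exact absurd ((List.countP_pos_iff (p := fun c => res c == 2)).2 ⟨a, ha, beq_iff_eq.mpr h'⟩) (by omega)
      have hpair := pairScan_two (l.map res) hmem
      rw [count_map_res l 1, ← hc1] at hpair
      rw [if_neg (show ¬ ((c2 : Int) ≥ 1) by exact_mod_cast h2), if_neg hno]
      by_cases h1 : 2 ≤ c1
      · rw [if_pos (show (c1 : Int) ≥ 2 by exact_mod_cast h1), if_pos (hpair.2 h1)]
      · rw [if_neg (show ¬ ((c1 : Int) ≥ 2) by exact_mod_cast h1),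
            if_neg (show ¬ (pairScan (l.map res) 2 = true) from by rw [hpair]; omega)]
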